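-- pv_equiv track=rewrite | github.com/haunglai/odpython | 11/猜字谜/猜字谜.py | duplicate_compare
-- ===== SOURCE A (Python) =====
-- def duplicate_compare(problem, answer):
--     problem_set = set();
--     for c in problem:
--         problem_set.add(c)
--
--     answer_set = set();
--     for c in answer:
--         answer_set.add(c)
--
--     if (answer_set == problem_set):
--         return True
--     return False
-- ===== SOURCE B (Python) =====
-- def duplicate_compare(problem, answer):
--     return all(c in answer for c in problem) and all(c in problem for c in answer)
-- ===== Notes on version B (the rewrite author's own statement) =====
-- stated objective: simpler
-- what changed: B checks set equality by bidirectional membership scans over the raw strings instead of building two set structures and comparing them.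
import Mathlib
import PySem

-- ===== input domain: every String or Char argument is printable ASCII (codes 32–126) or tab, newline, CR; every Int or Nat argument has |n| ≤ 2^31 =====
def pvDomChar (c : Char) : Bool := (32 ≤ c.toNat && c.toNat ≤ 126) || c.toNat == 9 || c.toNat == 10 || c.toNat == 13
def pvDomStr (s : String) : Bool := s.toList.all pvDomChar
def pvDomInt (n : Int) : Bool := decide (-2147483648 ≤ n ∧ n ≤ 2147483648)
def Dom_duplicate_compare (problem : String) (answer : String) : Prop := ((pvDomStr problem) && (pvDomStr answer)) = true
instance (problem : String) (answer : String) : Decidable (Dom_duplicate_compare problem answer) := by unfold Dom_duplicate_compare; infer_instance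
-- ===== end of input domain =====

-- B replaces A's two built sets and set comparison by bidirectional membership scans over the raw strings (simpler; no auxiliary structure).

-- ===== PORT A =====
def duplicate_compare (problem : String) (answer : String) : Bool :=
  let problem_set : PySem.Set Char := problem.toList.foldl PySem.Set.add PySem.Set.empty
  let answer_set : PySem.Set Char := answer.toList.foldl PySem.Set.add PySem.Set.empty
  if PySem.Set.equal answer_set problem_set then true else false

-- ===== PORT B =====
def duplicate_compare_alt (problem : String) (answer : String) : Bool :=
  problem.toList.all (fun c => answer.toList.contains c) &&
    answer.toList.all (fun c => problem.toList.contains c)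

-- ===== PRECONDITION & SPEC =====
def Spec_duplicate_compare (problem : String) (answer : String) (out : Bool) : Prop := out = duplicate_compare_alt problem answer
instance (problem : String) (answer : String) (out : Bool) : Decidable (Spec_duplicate_compare problem answer out) := by unfold Spec_duplicate_compare; infer_instance

-- ===== CLAIM (what is proved, stated in full; the proofs are below) =====
def Claim_equal_duplicate_compare : Prop := ∀ (problem : String) (answer : String), Dom_duplicate_compare problem answer → Spec_duplicate_compare problem answer (duplicate_compare problem answer)

-- ===== LEMMAS AND PROOFS =====

-- ===== VERDICT (by name: the statement is the Claim_ definition above) =====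
theorem duplicate_compare_spec : Claim_equal_duplicate_compare := by
  intro problem answer _
  unfold Spec_duplicate_compare duplicate_compare duplicate_compare_alt
  have hp : problem.toList.foldl PySem.Set.add PySem.Set.empty
      = PySem.Set.ofList problem.toList := rfl
  have hq : answer.toList.foldl PySem.Set.add PySem.Set.empty
      = PySem.Set.ofList answer.toList := rfl
  simp only [hp, hq]
  by_cases h : PySem.Set.equal (PySem.Set.ofList answer.toList) (PySem.Set.ofList problem.toList) = true
  · rw [if_pos h]
    rw [PySem.Set.equal_iff] at h
    symm
    rw [Bool.and_eq_true, List.all_eq_true, List.all_eq_true]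
    constructor
    · intro c hc
      simp only [List.contains_eq_mem, decide_eq_true_iff]
      exact ((h c).mpr (by simpa [PySem.Set.mem_ofList] using hc)) |> fun hx => by
        simpa [PySem.Set.mem_ofList] using hx
    · intro c hc
      simp only [List.contains_eq_mem, decide_eq_true_iff]
      exact ((h c).mp (by simpa [PySem.Set.mem_ofList] using hc)) |> fun hx => by
        simpa [PySem.Set.mem_ofList] using hx
  · rw [if_neg h]
    symm
    rw [Bool.eq_false_iff]
    intro hb
    apply h
    rw [PySem.Set.equal_iff]
    rw [Bool.and_eq_true, List.all_eq_true, List.all_eq_true] at hb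
    intro x
    simp only [PySem.Set.mem_ofList]
    constructor
    · intro hx
      have := hb.2 x hx
      simpa [List.contains_eq_mem] using this
    · intro hx
      have := hb.1 x hx
      simpa [List.contains_eq_mem] using this
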